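-- pv_equiv track=rewrite | github.com/michaelyeg/cmput206lab1 | histogram.py | cumulatehist
-- ===== SOURCE A (Python) =====
-- def cumulatehist(hist):
--     newhist = []
--     for i in range(0, len(hist)):
--         if i == 0:
--             newhist.append(hist[i])
--         else:
--             newhist.append(newhist[i-1] + hist[i])
--     return newhist
-- ===== SOURCE B (Python) =====
-- def cumulatehist(hist):
--     total = sum(hist)
--     out = []
--     for x in reversed(hist):
--         out.append(total)
--         total -= x
--     out.reverse()
--     return out
-- ===== Notes on version B (the rewrite author's own statement) =====
-- stated objective: alternative
-- what changed: Instead of a forward pass that extends the output with newhist[i-1]+hist[i], B first computes the total sum, then walks the input in reverse building the output back-to-front by subtracting each value from the running total, and reverses at the end.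
import Mathlib
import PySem

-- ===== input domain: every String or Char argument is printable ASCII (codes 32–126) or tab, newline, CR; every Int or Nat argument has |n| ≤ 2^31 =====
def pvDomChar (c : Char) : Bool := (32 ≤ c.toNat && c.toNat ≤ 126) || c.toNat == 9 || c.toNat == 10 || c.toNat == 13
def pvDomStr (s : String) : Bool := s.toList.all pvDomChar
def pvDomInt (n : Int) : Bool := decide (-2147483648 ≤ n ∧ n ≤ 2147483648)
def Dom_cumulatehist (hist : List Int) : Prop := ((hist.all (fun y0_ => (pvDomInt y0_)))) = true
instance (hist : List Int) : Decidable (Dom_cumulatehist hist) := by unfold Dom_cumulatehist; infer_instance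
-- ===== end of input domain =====

-- B replaces A's forward index loop (re-reading newhist[i-1], with an i==0 branch) by a
-- different decomposition: total = sum(hist) first, then a reverse walk building the
-- output back-to-front by subtraction, reversed at the end. Same result, no speed claim.

-- ===== PORT A =====
def cumulatehist (hist : List Int) : List Int :=
  (PySem.List.pyRange 0 hist.length 1).foldl
    (fun newhist i =>
      if i == 0 then
        newhist ++ [(PySem.List.pyGet? hist i).getD 0]
      else
        newhist ++ [(PySem.List.pyGet? newhist (i - 1)).getD 0 + (PySem.List.pyGet? hist i).getD 0])
    []

-- ===== PORT B =====
def cumulatehist_alt (hist : List Int) : List Int :=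
  ((hist.reverse.foldl (fun (st : Int × List Int) x => (st.1 - x, st.2 ++ [st.1]))
      (hist.sum, [])).2).reverse

-- ===== PRECONDITION & SPEC =====
def Spec_cumulatehist (hist : List Int) (out : List Int) : Prop := out = cumulatehist_alt hist
instance (hist : List Int) (out : List Int) : Decidable (Spec_cumulatehist hist out) := by unfold Spec_cumulatehist; infer_instance

-- ===== CLAIM (what is proved, stated in full; the proofs are below) =====
def Claim_equal_cumulatehist : Prop := ∀ (hist : List Int), Dom_cumulatehist hist → Spec_cumulatehist hist (cumulatehist hist)

-- ===== LEMMAS AND PROOFS =====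

/-- prefix sums starting from running total `t` -/
def pfx (t : Int) : List Int → List Int
  | [] => []
  | x :: xs => (t + x) :: pfx (t + x) xs

/-- suffix totals: value before subtracting each element, starting from `t` -/
def sfx (t : Int) : List Int → List Int
  | [] => []
  | x :: xs => t :: sfx (t - x) xs

theorem length_pfx (t : Int) (l : List Int) : (pfx t l).length = l.length := by
  induction l generalizing t with
  | nil => rfl
  | cons x xs ih => simp [pfx, ih]

theorem pfx_append_singleton (t : Int) (l : List Int) (x : Int) :
    pfx t (l ++ [x]) = pfx t l ++ [t + l.sum + x] := by
  induction l generalizing t with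
  | nil => simp [pfx]
  | cons y ys ih => simp [pfx, ih]; ring_nf

theorem getLast?_pfx (t : Int) (l : List Int) (h : l ≠ []) :
    (pfx t l).getLast? = some (t + l.sum) := by
  induction l generalizing t with
  | nil => exact absurd rfl h
  | cons y ys ih =>
    cases ys with
    | nil => simp [pfx]
    | cons z zs =>
      simp only [pfx, List.getLast?_cons_cons]
      have h2 := ih (t := t + y) (by simp)
      simp only [pfx] at h2
      rw [h2]
      simp
      ring

theorem sfx_append_singleton (t : Int) (l : List Int) (x : Int) :
    sfx t (l ++ [x]) = sfx t l ++ [t - l.sum] := by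
  induction l generalizing t with
  | nil => simp [sfx]
  | cons y ys ih => simp [sfx, ih]; ring_nf

theorem sfx_reverse (t : Int) (l : List Int) :
    (sfx t l.reverse).reverse = pfx (t - l.sum) l := by
  induction l generalizing t with
  | nil => simp [sfx, pfx]
  | cons x xs ih =>
    rw [List.reverse_cons, sfx_append_singleton]
    simp only [List.reverse_append, List.reverse_cons, List.reverse_nil, List.nil_append,
      List.sum_reverse, List.singleton_append, ih]
    simp only [pfx, List.sum_cons]
    have h : t - (x + xs.sum) + x = t - xs.sum := by ring
    rw [h]

theorem bFold (l : List Int) (t : Int) (acc : List Int) :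
    (l.foldl (fun (st : Int × List Int) x => (st.1 - x, st.2 ++ [st.1])) (t, acc)).2
      = acc ++ sfx t l := by
  induction l generalizing t acc with
  | nil => simp [sfx]
  | cons x xs ih => simp [List.foldl, sfx, ih]

theorem aFold (hist : List Int) (k : Nat) (hk : k ≤ hist.length) :
    (PySem.List.pyRange 0 k 1).foldl
      (fun newhist i =>
        if i == 0 then
          newhist ++ [(PySem.List.pyGet? hist i).getD 0]
        else
          newhist ++ [(PySem.List.pyGet? newhist (i - 1)).getD 0 + (PySem.List.pyGet? hist i).getD 0])
      []
    = pfx 0 (hist.take k) := by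
  induction k with
  | zero => simp [PySem.List.pyRange_one_eq_nil, pfx]
  | succ k ih =>
    have hk' : k ≤ hist.length := Nat.le_of_succ_le hk
    have hkk : k < hist.length := hk
    have hrange : PySem.List.pyRange 0 ((k + 1 : Nat) : Int) 1
        = PySem.List.pyRange 0 (k : Nat) 1 ++ [(k : Int)] := by
      have h := PySem.List.pyRange_one_succ_right (a := 0) (b := ((k : Nat) : Int))
        (by positivity)
      push_cast
      push_cast at h
      exact h
    rw [hrange, List.foldl_append, ih hk']
    simp only [List.foldl]
    have htake : hist.take (k + 1) = hist.take k ++ [hist[k]] := by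
      rw [List.take_add_one]
      simp [List.getElem?_eq_getElem hkk]
    rw [htake, pfx_append_singleton]
    have hget : (PySem.List.pyGet? hist (k : Int)).getD 0 = hist[k] := by
      simp [PySem.List.pyGet?_natCast, List.getElem?_eq_getElem hkk]
    by_cases hk0 : k = 0
    · subst hk0
      simp only [pfx, List.take_zero, List.sum_nil, List.nil_append]
      simp only [Nat.cast_zero] at hget
      simp [hget]
    · have hne : ((k : Int) == 0) = false := by
        simp; exact_mod_cast hk0
      rw [if_neg (by simp [hne])]
      have hlen : (pfx 0 (hist.take k)).length = k := by
        rw [length_pfx, List.length_take]; omega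
      have hlast : (PySem.List.pyGet? (pfx 0 (hist.take k)) ((k : Int) - 1)).getD 0
          = 0 + (hist.take k).sum := by
        have h1 : ((k : Int) - 1) = ((k - 1 : Nat) : Int) := by omega
        rw [h1, PySem.List.pyGet?_natCast]
        have hne' : hist.take k ≠ [] := by
          have hpos : 0 < (hist.take k).length := by
            rw [List.length_take]
            omega
          exact List.ne_nil_of_length_pos hpos
        have := getLast?_pfx 0 (hist.take k) hne'
        rw [List.getLast?_eq_getElem? ] at this
        rw [hlen] at this
        rw [this]
        rfl
      rw [hlast, hget]

-- ===== VERDICT (by name: the statement is the Claim_ definition above) =====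
theorem cumulatehist_spec : Claim_equal_cumulatehist := by
  intro hist _
  unfold Spec_cumulatehist cumulatehist cumulatehist_alt
  rw [bFold, List.nil_append, sfx_reverse, sub_self,
    aFold hist hist.length le_rfl, List.take_length]
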